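-- pv_equiv track=rewrite | github.com/SangPhan-wpgg/Do_an_AI_ca_nhan_cuoi_ki | nhap.py | quay_lui_n
-- ===== SOURCE A (Python) =====
-- danh_sach_bien_n = ["X", "Y", "Z"]
--
-- cac_mien_gia_tri_n = {
--     "X": [0,1,2,3,4,5,6,7,8],
--     "Y": [0,1,2,3,4,5,6,7,8],
--     "Z": [0,1,2,3,4,5,6,7,8]
-- }
--
-- def kiem_tra_nhat_quan_n(bien_n, gia_tri_n, phep_gan_n):
--     for bien_khac_n in phep_gan_n:
--         if phep_gan_n[bien_khac_n] == gia_tri_n: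
--             return False
--     return True
--
-- def chon_bien_chua_gan_n(danh_sach_bien_trong_n, phep_gan_trong_n):
--     for bien_trong_n in danh_sach_bien_trong_n:
--         if bien_trong_n not in phep_gan_trong_n:
--             return bien_trong_n
--     return None
--
-- def quay_lui_n(phep_gan_n):
--     if len(phep_gan_n) == len(danh_sach_bien_n):
--         return phep_gan_n
--
--     bien_duoc_chon_n = chon_bien_chua_gan_n(danh_sach_bien_n, phep_gan_n)
--     if bien_duoc_chon_n is None:
--         return None
--
--     for gia_tri_duyet_n in cac_mien_gia_tri_n[bien_duoc_chon_n]: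
--         if kiem_tra_nhat_quan_n(bien_duoc_chon_n, gia_tri_duyet_n, phep_gan_n):
--             phep_gan_n[bien_duoc_chon_n] = gia_tri_duyet_n
--             ket_qua_n = quay_lui_n(phep_gan_n)
--             if ket_qua_n:
--                 return ket_qua_n
--             del phep_gan_n[bien_duoc_chon_n]
--     return None
-- ===== SOURCE B (Python) =====
-- danh_sach_bien_n = ["X", "Y", "Z"]
--
-- def quay_lui_n(phep_gan_n):
--     # Greedy single pass instead of backtracking search: the domains (0..8) are
--     # always large enough, so the lexicographically-first consistent assignment
--     # is found directly. Mutates phep_gan_n in place, like the original.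
--     if len(phep_gan_n) > 3:
--         return None
--     for bien in danh_sach_bien_n:
--         if len(phep_gan_n) == 3:
--             break
--         if bien in phep_gan_n:
--             continue
--         phep_gan_n[bien] = next(v for v in range(9) if v not in phep_gan_n.values())
--     return phep_gan_n
-- ===== Notes on version B (the rewrite author's own statement) =====
-- stated objective: simpler
-- what changed: Replaces the recursive backtracking search (choose an unassigned variable, try every domain value, recurse, undo on failure) with a single greedy pass over the three variables that assigns each missing one the smallest value not already used; no backtracking is ever needed since the 9-value domains always exceed the at-most-2 conflicting values.
import Mathlib
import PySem

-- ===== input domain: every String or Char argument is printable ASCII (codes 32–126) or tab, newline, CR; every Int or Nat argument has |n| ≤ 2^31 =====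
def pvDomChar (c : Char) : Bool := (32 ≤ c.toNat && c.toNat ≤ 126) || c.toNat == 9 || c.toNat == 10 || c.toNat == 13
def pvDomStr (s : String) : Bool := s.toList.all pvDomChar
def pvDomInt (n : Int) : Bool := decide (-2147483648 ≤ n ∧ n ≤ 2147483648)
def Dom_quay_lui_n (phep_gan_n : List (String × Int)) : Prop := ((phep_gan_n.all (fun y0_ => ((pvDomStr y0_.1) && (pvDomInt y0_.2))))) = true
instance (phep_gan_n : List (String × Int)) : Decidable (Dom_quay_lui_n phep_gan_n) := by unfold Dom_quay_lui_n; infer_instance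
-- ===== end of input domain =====

-- B replaces A's recursive backtracking with a single greedy pass (the 9-value domains always
-- exceed the at-most-2 conflicting values, so no backtracking can occur); objective: simpler.
-- Both Pythons mutate the input dict in place identically; the equivalence proved here is about
-- the RETURN value (the dict is ported by value as an association list).

-- ===== PORT A =====
-- danh_sach_bien_n = ["X", "Y", "Z"]
def danhSachBien : List String := ["X", "Y", "Z"]

-- the three domains cac_mien_gia_tri_n["X"/"Y"/"Z"] are all list(range(9))
def mienGiaTri : List Int := PySem.List.pyRange 0 9 1

-- 'for bien_khac_n in phep_gan_n: if phep_gan_n[bien_khac_n] == gia_tri_n: return False'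
def kiemTraGo (gia_tri : Int) (d : PySem.Dict String Int) : List String → Bool
  | [] => true
  | k :: ks => if d.getD k 0 == gia_tri then false else kiemTraGo gia_tri d ks

def kiem_tra_nhat_quan_n (_bien : String) (gia_tri : Int) (d : PySem.Dict String Int) : Bool :=
  kiemTraGo gia_tri d d.keys

def chon_bien_chua_gan_n : List String → PySem.Dict String Int → Option String
  | [], _ => none
  | b :: bs, d => if !(d.contains b) then some b else chon_bien_chua_gan_n bs d

-- The recursion of quay_lui_n, with an explicit Nat bound equal to the number of still-unassigned
-- variables (exactly the recursion depth of the Python: each recursive call assigns one more of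
-- ["X","Y","Z"]); the fuel-0 branch is never reached.  After 'del phep_gan_n[bien_duoc_chon_n]'
-- the dict is again exactly d (the chosen key was fresh), so the value loop continues with d.
mutual
def quayLuiGo : Nat → PySem.Dict String Int → Option (PySem.Dict String Int)
  | n, d =>
    if d.size = 3 then some d
    else
      match chon_bien_chua_gan_n danhSachBien d with
      | none => none
      | some b =>
        match n with
        | 0 => none
        | n + 1 => quayLuiVals n b mienGiaTri d
def quayLuiVals : Nat → String → List Int → PySem.Dict String Int → Option (PySem.Dict String Int)
  | _, _, [], _ => none
  | n, b, v :: vs, d =>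
    if kiem_tra_nhat_quan_n b v d then
      match quayLuiGo n (d.insert b v) with
      | some r => if r.size = 0 then quayLuiVals n b vs d else some r   -- 'if ket_qua_n:' — empty dict is falsy
      | none => quayLuiVals n b vs d
    else quayLuiVals n b vs d
end

def quay_lui_n (phep_gan_n : List (String × Int)) : Option (List (String × Int)) :=
  let d := PySem.Dict.mk phep_gan_n
  (quayLuiGo ((danhSachBien.filter (fun v => !(d.contains v))).length) d).map PySem.Dict.items

-- ===== PORT B =====
-- next(v for v in range(9) if v not in phep_gan_n.values())
def timGiaTriNho (d : PySem.Dict String Int) : Option Int :=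
  (PySem.List.pyRange 0 9 1).find? (fun v => !(d.values.contains v))

-- the 'for bien in danh_sach_bien_n' loop of Source B (the none-branch is unreachable: with fewer
-- than 3 entries a free value among 0..8 always exists)
def dienThem : List String → PySem.Dict String Int → PySem.Dict String Int
  | [], d => d
  | b :: bs, d =>
    if d.size = 3 then d
    else if d.contains b then dienThem bs d
    else
      match timGiaTriNho d with
      | some v => dienThem bs (d.insert b v)
      | none => d

def quay_lui_n_alt (phep_gan_n : List (String × Int)) : Option (List (String × Int)) :=
  let d := PySem.Dict.mk phep_gan_n
  if 3 < d.size then none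
  else some (dienThem danhSachBien d).items

-- ===== PRECONDITION & SPEC =====
-- Pre_ excludes association lists with duplicate keys: they do not represent any Python dict
-- input (a Python dict always has distinct keys), so the ports' behaviour there is about no input
-- of A at all.
def Pre_quay_lui_n (phep_gan_n : List (String × Int)) : Prop :=
  (phep_gan_n.map Prod.fst).Nodup
instance (phep_gan_n : List (String × Int)) : Decidable (Pre_quay_lui_n phep_gan_n) := by
  unfold Pre_quay_lui_n; infer_instance

def pvWitness_quay_lui_n : (List (String × Int)) := [("X", 3), ("A", 7)]

def Spec_quay_lui_n (phep_gan_n : List (String × Int)) (out : Option (List (String × Int))) : Prop := out = quay_lui_n_alt phep_gan_n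
instance (phep_gan_n : List (String × Int)) (out : Option (List (String × Int))) : Decidable (Spec_quay_lui_n phep_gan_n out) := by unfold Spec_quay_lui_n; infer_instance

-- ===== CLAIM (what is proved, stated in full; the proofs are below) =====
def Claim_equal_quay_lui_n : Prop := ∀ (phep_gan_n : List (String × Int)), Dom_quay_lui_n phep_gan_n → Pre_quay_lui_n phep_gan_n → Spec_quay_lui_n phep_gan_n (quay_lui_n phep_gan_n)

-- ===== LEMMAS AND PROOFS =====

theorem keys_length (d : PySem.Dict String Int) : d.keys.length = d.size := by
  simp [PySem.Dict.keys, PySem.Dict.size]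

theorem values_length (d : PySem.Dict String Int) : d.values.length = d.size := by
  simp [PySem.Dict.values, PySem.Dict.size]

-- a list containing three distinct elements has length >= 3
theorem three_mem_length {α : Type} [DecidableEq α] {a b c : α} {l : List α}
    (hab : a ≠ b) (hac : a ≠ c) (hbc : b ≠ c)
    (ha : a ∈ l) (hb : b ∈ l) (hc : c ∈ l) : 3 ≤ l.length := by
  have hsub : ({a, b, c} : Finset α) ⊆ l.toFinset := by
    intro x hx
    simp only [Finset.mem_insert, Finset.mem_singleton] at hx
    rcases hx with rfl | rfl | rfl <;> simpa [List.mem_toFinset]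
  have h3 : ({a, b, c} : Finset α).card = 3 := by
    rw [Finset.card_insert_of_notMem (by simp [hab, hac]),
      Finset.card_insert_of_notMem (by simp [hbc]), Finset.card_singleton]
  calc 3 = ({a, b, c} : Finset α).card := h3.symm
    _ ≤ l.toFinset.card := Finset.card_le_card hsub
    _ ≤ l.length := l.toFinset_card_le

theorem kiemTraGo_eq (g : Int) (d : PySem.Dict String Int) (ks : List String) :
    kiemTraGo g d ks = ks.all (fun k => !(d.getD k 0 == g)) := by
  induction ks with
  | nil => rfl
  | cons k ks ih =>
    simp only [kiemTraGo, List.all_cons, ih]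
    by_cases h : d.getD k 0 == g <;> simp [h]

theorem values_eq_map (d : PySem.Dict String Int) (h : d.keys.Nodup) :
    d.values = d.keys.map (fun k => d.getD k 0) := by
  simp only [PySem.Dict.values, PySem.Dict.keys, List.map_map]
  apply List.map_congr_left
  rintro ⟨k, w⟩ hp
  exact (PySem.Dict.getD_of_mem_items d hp h 0).symm

theorem kiemTra_eq (b : String) (v : Int) (d : PySem.Dict String Int)
    (h : d.keys.Nodup) :
    kiem_tra_nhat_quan_n b v d = !(d.values.contains v) := by
  rw [kiem_tra_nhat_quan_n, kiemTraGo_eq, values_eq_map d h]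
  induction d.keys with
  | nil => rfl
  | cons k ks ih =>
    simp only [List.all_cons, List.map_cons, List.contains_cons, ih, Bool.not_or]
    by_cases hk : d.getD k 0 = v
    · simp [hk]
    · have hbeq : (v == d.getD k 0) = (d.getD k 0 == v) := by
        simp [eq_comm]
      rw [hbeq]

theorem dien_of_size3 (bs : List String) (d : PySem.Dict String Int) (h : d.size = 3) :
    dienThem bs d = d := by
  cases bs with
  | nil => rfl
  | cons b bs => simp [dienThem, h]

theorem dien_skip (b : String) (bs : List String) (d : PySem.Dict String Int)
    (h : d.contains b = true) : dienThem (b :: bs) d = dienThem bs d := by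
  by_cases h3 : d.size = 3
  · simp [dienThem, h3, dien_of_size3 _ _ h3]
  · simp [dienThem, h3, h]

theorem dien_step (b : String) (bs : List String) (d : PySem.Dict String Int) (v : Int)
    (h3 : ¬ d.size = 3) (hc : d.contains b = false) (hf : timGiaTriNho d = some v) :
    dienThem (b :: bs) d = dienThem bs (d.insert b v) := by
  simp [dienThem, h3, hc, hf]

theorem dien_size_le (bs : List String) (d : PySem.Dict String Int) :
    d.size ≤ (dienThem bs d).size := by
  induction bs generalizing d with
  | nil => simp [dienThem]
  | cons b bs ih =>
    simp only [dienThem]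
    split
    · exact le_rfl
    · split
      · exact ih d
      · cases hf : timGiaTriNho d with
        | none => simp
        | some v =>
          simp only
          calc d.size ≤ (d.insert b v).size := by
                rw [PySem.Dict.size_insert]; split <;> omega
            _ ≤ _ := ih _

-- with fewer than 3 entries some value in 0..8 is unused
theorem timGiaTriNho_isSome (d : PySem.Dict String Int) (h : d.size < 3) :
    ∃ v, timGiaTriNho d = some v := by
  cases hf : timGiaTriNho d with
  | some v => exact ⟨v, rfl⟩
  | none =>
    exfalso
    rw [timGiaTriNho, List.find?_eq_none] at hf
    have hmem : ∀ x : Int, x ∈ PySem.List.pyRange 0 9 1 → x ∈ d.values := by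
      intro x hx
      have := hf x hx
      simpa using this
    have hr : ∀ x : Int, 0 ≤ x → x < 9 → x ∈ PySem.List.pyRange 0 9 1 := by
      intro x h0 h9
      exact (PySem.List.mem_pyRange_one).mpr ⟨h0, h9⟩
    have h0 : (0 : Int) ∈ d.values := hmem 0 (hr 0 (by omega) (by omega))
    have h1 : (1 : Int) ∈ d.values := hmem 1 (hr 1 (by omega) (by omega))
    have h2 : (2 : Int) ∈ d.values := hmem 2 (hr 2 (by omega) (by omega))
    have := three_mem_length (a := (0 : Int)) (b := 1) (c := 2)
      (by decide) (by decide) (by decide) h0 h1 h2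
    rw [values_length] at this
    omega

theorem vals_none (n : Nat)
    (hIH : ∀ d : PySem.Dict String Int, 3 < d.size → quayLuiGo n d = none) :
    ∀ (vs : List Int) (b : String) (d : PySem.Dict String Int),
      3 < d.size → quayLuiVals n b vs d = none := by
  intro vs
  induction vs with
  | nil => intro b d _; simp [quayLuiVals]
  | cons v vs ih =>
    intro b d h
    have hins : 3 < (d.insert b v).size := by
      rw [PySem.Dict.size_insert]; split <;> omega
    simp only [quayLuiVals]
    rw [hIH _ hins]
    split <;> [exact ih b d h; exact ih b d h]

theorem go_none (n : Nat) :
    ∀ d : PySem.Dict String Int, 3 < d.size → quayLuiGo n d = none := by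
  induction n with
  | zero =>
    intro d h
    simp only [quayLuiGo]
    rw [if_neg (by omega)]
    cases chon_bien_chua_gan_n danhSachBien d <;> rfl
  | succ n ih =>
    intro d h
    simp only [quayLuiGo]
    rw [if_neg (by omega)]
    cases hc : chon_bien_chua_gan_n danhSachBien d with
    | none => rfl
    | some b => exact vals_none n ih _ b d h

theorem missing_insert (d : PySem.Dict String Int) (b : String) (v : Int)
    (hb : b ∈ danhSachBien) (hcb : d.contains b = false) :
    (danhSachBien.filter (fun x => !((d.insert b v).contains x))).length + 1
      = (danhSachBien.filter (fun x => !(d.contains x))).length := by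
  simp only [danhSachBien, List.mem_cons] at hb
  rcases hb with rfl | rfl | hb
  · cases hY : d.contains "Y" <;> cases hZ : d.contains "Z" <;>
      simp [danhSachBien, List.filter, PySem.Dict.contains_insert, hcb, hY, hZ]
  · cases hX : d.contains "X" <;> cases hZ : d.contains "Z" <;>
      simp [danhSachBien, List.filter, PySem.Dict.contains_insert, hcb, hX, hZ]
  · rcases hb with rfl | hb
    · cases hX : d.contains "X" <;> cases hY : d.contains "Y" <;>
        simp [danhSachBien, List.filter, PySem.Dict.contains_insert, hcb, hX, hY]
    · cases hb

theorem vals_eq (n : Nat) (b : String) (d : PySem.Dict String Int)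
    (hnd : d.keys.Nodup) (hsz : d.size < 3)
    (hb : b ∈ danhSachBien) (hcb : d.contains b = false)
    (hmiss : (danhSachBien.filter (fun x => !(d.contains x))).length ≤ n + 1)
    (ih : ∀ d' : PySem.Dict String Int, d'.keys.Nodup → d'.size ≤ 3 →
      (danhSachBien.filter (fun x => !(d'.contains x))).length ≤ n →
      quayLuiGo n d' = some (dienThem danhSachBien d')) :
    ∀ vs : List Int,
      quayLuiVals n b vs d
        = (vs.find? (fun v => !(d.values.contains v))).map
            (fun v => dienThem danhSachBien (d.insert b v)) := by
  intro vs
  induction vs with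
  | nil => simp [quayLuiVals]
  | cons v vs ihv =>
    simp only [quayLuiVals]
    rw [kiemTra_eq b v d hnd]
    by_cases hv : d.values.contains v
    · simp only [hv, Bool.not_true, List.find?]
      simpa [hv] using ihv
    · have hv' : d.values.contains v = false := by simpa using hv
      have hins : (d.insert b v).size = d.size + 1 := by
        rw [PySem.Dict.size_insert, hcb]; simp
      have hrec : quayLuiGo n (d.insert b v)
          = some (dienThem danhSachBien (d.insert b v)) := by
        apply ih
        · exact PySem.Dict.nodup_keys_insert d b v hnd
        · omega
        · have := missing_insert d b v hb hcb
          omega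
      have hpos : 0 < (dienThem danhSachBien (d.insert b v)).size := by
        have := dien_size_le danhSachBien (d.insert b v)
        omega
      simp only [hv', Bool.not_false, if_true, hrec, List.find?]
      rw [if_neg (by omega)]
      simp

theorem go_eq_fill (n : Nat) :
    ∀ d : PySem.Dict String Int, d.keys.Nodup → d.size ≤ 3 →
      (danhSachBien.filter (fun x => !(d.contains x))).length ≤ n →
      quayLuiGo n d = some (dienThem danhSachBien d) := by
  induction n with
  | zero =>
    intro d hnd hsz hm
    by_cases h3 : d.size = 3
    · simp only [quayLuiGo]
      rw [if_pos h3, dien_of_size3 _ _ h3]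
    · exfalso
      have hfil : danhSachBien.filter (fun x => !(d.contains x)) = [] :=
        List.length_eq_zero_iff.mp (by omega)
      have hall : ∀ x ∈ danhSachBien, d.contains x = true := by
        intro x hx
        have := List.filter_eq_nil_iff.mp hfil x hx
        simpa using this
      have h3le : 3 ≤ d.keys.length := by
        apply three_mem_length (a := "X") (b := "Y") (c := "Z")
          (by decide) (by decide) (by decide)
        · exact (PySem.Dict.contains_iff_mem_keys _ _).mp (hall "X" (by simp [danhSachBien]))
        · exact (PySem.Dict.contains_iff_mem_keys _ _).mp (hall "Y" (by simp [danhSachBien]))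
        · exact (PySem.Dict.contains_iff_mem_keys _ _).mp (hall "Z" (by simp [danhSachBien]))
      rw [keys_length] at h3le
      omega
  | succ n ih =>
    intro d hnd hsz hm
    by_cases h3 : d.size = 3
    · simp only [quayLuiGo]
      rw [if_pos h3, dien_of_size3 _ _ h3]
    · have hszlt : d.size < 3 := by omega
      obtain ⟨v0, hv0⟩ := timGiaTriNho_isSome d hszlt
      have hfind : mienGiaTri.find? (fun v => !(d.values.contains v)) = some v0 := hv0
      cases hX : d.contains "X" with
      | false =>
        have hchon : chon_bien_chua_gan_n danhSachBien d = some "X" := by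
          simp [chon_bien_chua_gan_n, danhSachBien, hX]
        simp only [quayLuiGo]
        rw [if_neg h3, hchon]
        change quayLuiVals n "X" mienGiaTri d = some (dienThem danhSachBien d)
        rw [vals_eq n "X" d hnd hszlt (by simp [danhSachBien]) hX hm ih, hfind]
        simp only [Option.map_some]
        congr 1
        have hR : dienThem danhSachBien (d.insert "X" v0)
            = dienThem ["Y", "Z"] (d.insert "X" v0) :=
          dien_skip _ _ _ (PySem.Dict.contains_insert_self d "X" v0)
        have hL : dienThem danhSachBien d = dienThem ["Y", "Z"] (d.insert "X" v0) :=
          dien_step "X" ["Y", "Z"] d v0 h3 hX hv0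
        rw [hR, ← hL]
      | true =>
        cases hY : d.contains "Y" with
        | false =>
          have hchon : chon_bien_chua_gan_n danhSachBien d = some "Y" := by
            simp [chon_bien_chua_gan_n, danhSachBien, hX, hY]
          simp only [quayLuiGo]
          rw [if_neg h3, hchon]
          change quayLuiVals n "Y" mienGiaTri d = some (dienThem danhSachBien d)
          rw [vals_eq n "Y" d hnd hszlt (by simp [danhSachBien]) hY hm ih, hfind]
          simp only [Option.map_some]
          congr 1
          have hR : dienThem danhSachBien (d.insert "Y" v0)
              = dienThem ["Z"] (d.insert "Y" v0) := by
            rw [show danhSachBien = "X" :: "Y" :: ["Z"] from rfl]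
            rw [dien_skip _ _ _ (by rw [PySem.Dict.contains_insert]; simp [hX])]
            exact dien_skip _ _ _ (PySem.Dict.contains_insert_self d "Y" v0)
          have hL : dienThem danhSachBien d = dienThem ["Z"] (d.insert "Y" v0) := by
            rw [show danhSachBien = "X" :: "Y" :: ["Z"] from rfl, dien_skip _ _ _ hX]
            exact dien_step "Y" ["Z"] d v0 h3 hY hv0
          rw [hR, ← hL]
        | true =>
          cases hZ : d.contains "Z" with
          | false =>
            have hchon : chon_bien_chua_gan_n danhSachBien d = some "Z" := by
              simp [chon_bien_chua_gan_n, danhSachBien, hX, hY, hZ]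
            simp only [quayLuiGo]
            rw [if_neg h3, hchon]
            change quayLuiVals n "Z" mienGiaTri d = some (dienThem danhSachBien d)
            rw [vals_eq n "Z" d hnd hszlt (by simp [danhSachBien]) hZ hm ih, hfind]
            simp only [Option.map_some]
            congr 1
            have hR : dienThem danhSachBien (d.insert "Z" v0)
                = dienThem [] (d.insert "Z" v0) := by
              rw [show danhSachBien = "X" :: "Y" :: "Z" :: [] from rfl]
              rw [dien_skip _ _ _ (by rw [PySem.Dict.contains_insert]; simp [hX])]
              rw [dien_skip _ _ _ (by rw [PySem.Dict.contains_insert]; simp [hY])]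
              exact dien_skip _ _ _ (PySem.Dict.contains_insert_self d "Z" v0)
            have hL : dienThem danhSachBien d = dienThem [] (d.insert "Z" v0) := by
              rw [show danhSachBien = "X" :: "Y" :: "Z" :: [] from rfl,
                dien_skip _ _ _ hX, dien_skip _ _ _ hY]
              exact dien_step "Z" [] d v0 h3 hZ hv0
            rw [hR, ← hL]
          | true =>
            exfalso
            have h3le : 3 ≤ d.keys.length := by
              apply three_mem_length (a := "X") (b := "Y") (c := "Z")
                (by decide) (by decide) (by decide)
              · exact (PySem.Dict.contains_iff_mem_keys _ _).mp hX
              · exact (PySem.Dict.contains_iff_mem_keys _ _).mp hY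
              · exact (PySem.Dict.contains_iff_mem_keys _ _).mp hZ
            rw [keys_length] at h3le
            omega

-- ===== VERDICT (by name: the statement is the Claim_ definition above) =====
theorem quay_lui_n_spec : Claim_equal_quay_lui_n := by
  intro l _hdom hpre
  unfold Spec_quay_lui_n quay_lui_n quay_lui_n_alt
  simp only
  set d : PySem.Dict String Int := PySem.Dict.mk l with hd
  have hnd : d.keys.Nodup := by
    simpa [hd, PySem.Dict.keys] using hpre
  by_cases hsz : 3 < d.size
  · rw [go_none _ d hsz, if_pos hsz]; rfl
  · rw [go_eq_fill _ d hnd (by omega) le_rfl, if_neg hsz]; rfl
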